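-- pv_equiv track=rewrite | github.com/Shadowfang116/CDS | backend/hf_extractor/extractors.py | _compute_span_offsets
-- ===== SOURCE A (Python) =====
-- from typing import List, Tuple, Dict, Any, Optional
--
-- def _compute_span_offsets(words: List[str], token_indices: List[int]) -> Tuple[Optional[int], Optional[int]]:
--     """
--     Compute character span offsets for token indices in page text.
--
--     Args:
--         words: List of OCR words
--         token_indices: List of token indices
--
--     Returns:
--         Tuple of (span_start, span_end) character offsets in joined page text.
--         Returns (None, None) if indices are empty or invalid.
--     """
--     if not token_indices or not words:
--         return None, None
--
--     # Build page text: join words with spaces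
--     page_text = " ".join(words)
--
--     # Find first and last token indices
--     first_idx = min(token_indices)
--     last_idx = max(token_indices)
--
--     # Compute character positions: iterate through words and track position
--     char_pos = 0
--     span_start = None
--     span_end = None
--
--     for i, word in enumerate(words):
--         if i == first_idx:
--             span_start = char_pos
--         if i == last_idx:
--             span_end = char_pos + len(word)
--             break
--         char_pos += len(word) + 1  # +1 for space after word
--
--     # Fallback: if indices not found
--     if span_start is None:
--         span_start = 0
--     if span_end is None:
--         span_end = len(page_text)
--
--     return span_start, span_end
-- ===== SOURCE B (Python) =====
-- from typing import List, Tuple, Optional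
--
-- def _compute_span_offsets(words: List[str], token_indices: List[int]) -> Tuple[Optional[int], Optional[int]]:
--     """Prefix-offset table, then direct indexing (no scan with early break)."""
--     if not token_indices or not words:
--         return None, None
--     n = len(words)
--     offsets = [0] * (n + 1)
--     for i, w in enumerate(words):
--         offsets[i + 1] = offsets[i] + len(w) + 1
--     total = offsets[n] - 1  # == len(" ".join(words))
--     first = min(token_indices)
--     last = max(token_indices)
--     span_start = offsets[first] if 0 <= first < n else 0
--     span_end = offsets[last] + len(words[last]) if 0 <= last < n else total
--     return span_start, span_end
-- ===== Notes on version B (the rewrite author's own statement) =====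
-- stated objective: alternative
-- what changed: Replaced the stateful enumerate scan with early break by building a prefix-offset table once and computing both span bounds by direct table indexing under explicit range checks.
import Mathlib
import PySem

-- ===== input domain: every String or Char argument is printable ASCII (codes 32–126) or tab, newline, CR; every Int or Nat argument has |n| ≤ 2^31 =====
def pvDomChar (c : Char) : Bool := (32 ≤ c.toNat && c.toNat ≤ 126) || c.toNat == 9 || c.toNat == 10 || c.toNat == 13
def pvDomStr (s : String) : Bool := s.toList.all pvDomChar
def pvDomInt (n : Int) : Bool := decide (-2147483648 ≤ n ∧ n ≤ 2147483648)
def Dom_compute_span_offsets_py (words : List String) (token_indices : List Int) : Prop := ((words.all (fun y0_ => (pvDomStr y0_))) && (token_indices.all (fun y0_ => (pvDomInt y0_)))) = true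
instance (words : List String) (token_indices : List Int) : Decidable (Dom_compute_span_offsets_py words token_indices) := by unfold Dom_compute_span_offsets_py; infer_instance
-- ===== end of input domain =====

-- B replaces A's stateful scan-with-early-break by a prefix-offset table plus direct indexing (alternative decomposition, same cost).

-- ===== PORT A =====
-- A's for-loop over enumerate(words) with its early break, carrying (char_pos, span_start, span_end)
def aLoop (first last : Int) : List String → Int → Int → Option Int → Option Int → Option Int × Option Int
  | [], _, _, ss, se => (ss, se)
  | w :: ws, i, cp, ss, se =>
      let ss' := if i = first then some cp else ss
      if i = last then (ss', some (cp + PySem.Str.len w))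
      else aLoop first last ws (i + 1) (cp + PySem.Str.len w + 1) ss' se

def compute_span_offsets_py (words : List String) (token_indices : List Int) : Option Int × Option Int :=
  if token_indices = [] ∨ words = [] then (none, none)
  else
    let page_text := PySem.Str.join " " words
    let first := ((PySem.List.min? token_indices (fun x => x)).getD 0)
    let last := ((PySem.List.max? token_indices (fun x => x)).getD 0)
    let r := aLoop first last words 0 0 none none
    let span_start := r.1.getD 0
    let span_end := r.2.getD (PySem.Str.len page_text)
    (some span_start, some span_end)

-- ===== PORT B =====
-- offsets[i] = char position of word i in the joined text; table of length words.length + 1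
def bOffs : List String → Int → List Int
  | [], c => [c]
  | w :: ws, c => c :: bOffs ws (c + PySem.Str.len w + 1)

def compute_span_offsets_py_alt (words : List String) (token_indices : List Int) : Option Int × Option Int :=
  if token_indices = [] ∨ words = [] then (none, none)
  else
    let n : Int := words.length
    let offsets := bOffs words 0
    let total := offsets.getD words.length 0 - 1
    let first := ((PySem.List.min? token_indices (fun x => x)).getD 0)
    let last := ((PySem.List.max? token_indices (fun x => x)).getD 0)
    let span_start := if 0 ≤ first ∧ first < n then offsets.getD first.toNat 0 else 0
    let span_end := if 0 ≤ last ∧ last < n then offsets.getD last.toNat 0 + PySem.Str.len (words.getD last.toNat "") else total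
    (some span_start, some span_end)

-- ===== PRECONDITION & SPEC =====
def Spec_compute_span_offsets_py (words : List String) (token_indices : List Int) (out : Option Int × Option Int) : Prop := out = compute_span_offsets_py_alt words token_indices
instance (words : List String) (token_indices : List Int) (out : Option Int × Option Int) : Decidable (Spec_compute_span_offsets_py words token_indices out) := by unfold Spec_compute_span_offsets_py; infer_instance

-- ===== CLAIM (what is proved, stated in full; the proofs are below) =====
def Claim_equal_compute_span_offsets_py : Prop := ∀ (words : List String) (token_indices : List Int), Dom_compute_span_offsets_py words token_indices → Spec_compute_span_offsets_py words token_indices (compute_span_offsets_py words token_indices)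

-- ===== LEMMAS AND PROOFS =====

-- characterization of A's scan in terms of B's offset table
theorem aLoop_eq (first last : Int) (h : first ≤ last) (ws : List String) :
    ∀ (i cp : Int) (ss : Option Int),
    aLoop first last ws i cp ss none =
      ((if i ≤ first ∧ first < i + ws.length then some ((bOffs ws cp).getD (first - i).toNat 0) else ss),
       (if i ≤ last ∧ last < i + ws.length then some ((bOffs ws cp).getD (last - i).toNat 0 + PySem.Str.len (ws.getD (last - i).toNat "")) else none)) := by
  induction ws with
  | nil =>
    intro i cp ss
    simp only [aLoop, List.length_nil, Nat.cast_zero, add_zero]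
    rw [if_neg (by omega : ¬(i ≤ first ∧ first < i)), if_neg (by omega : ¬(i ≤ last ∧ last < i))]
  | cons w ws ih =>
    intro i cp ss
    simp only [aLoop, List.length_cons, Nat.cast_add, Nat.cast_one, bOffs]
    by_cases hl : i = last
    · subst hl
      rw [if_pos rfl,
          if_pos (⟨le_refl _, by omega⟩ : i ≤ i ∧ i < i + ((ws.length : Int) + 1)),
          show (i - i).toNat = 0 from by omega]
      simp only [List.getD_cons_zero, Prod.mk.injEq]
      refine ⟨?_, trivial⟩
      by_cases hf : i = first
      · subst hf
        rw [if_pos rfl, if_pos (⟨le_refl _, by omega⟩ : i ≤ i ∧ i < i + ((ws.length : Int) + 1)),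
            show (i - i).toNat = 0 from by omega, List.getD_cons_zero]
      · rw [if_neg hf, if_neg (by omega : ¬(i ≤ first ∧ first < i + ((ws.length : Int) + 1)))]
    · rw [if_neg hl, ih (i + 1) (cp + PySem.Str.len w + 1) (if i = first then some cp else ss)]
      simp only [Prod.mk.injEq]
      constructor
      · by_cases hc : i + 1 ≤ first ∧ first < i + 1 + (ws.length : Int)
        · rw [if_pos hc, if_pos (by omega : i ≤ first ∧ first < i + ((ws.length : Int) + 1)),
              show (first - i).toNat = (first - (i + 1)).toNat + 1 from by omega,
              List.getD_cons_succ]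
        · rw [if_neg hc]
          by_cases hf : i = first
          · subst hf
            rw [if_pos rfl, if_pos (by omega : i ≤ i ∧ i < i + ((ws.length : Int) + 1)),
                show (i - i).toNat = 0 from by omega, List.getD_cons_zero]
          · rw [if_neg hf, if_neg (by omega : ¬(i ≤ first ∧ first < i + ((ws.length : Int) + 1)))]
      · by_cases hc : i + 1 ≤ last ∧ last < i + 1 + (ws.length : Int)
        · rw [if_pos hc, if_pos (by omega : i ≤ last ∧ last < i + ((ws.length : Int) + 1)),
              show (last - i).toNat = (last - (i + 1)).toNat + 1 from by omega,
              List.getD_cons_succ, List.getD_cons_succ]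
        · rw [if_neg hc, if_neg (by omega : ¬(i ≤ last ∧ last < i + ((ws.length : Int) + 1)))]

-- the final table entry is 1 past the length of the space-joined text
theorem bOffs_getD_full : ∀ (ws : List String) (c : Int), ws ≠ [] →
    (bOffs ws c).getD ws.length 0 = c + PySem.Str.len (PySem.Str.join " " ws) + 1 := by
  intro ws
  induction ws with
  | nil => intro c hc; exact absurd rfl hc
  | cons w ws ih =>
    intro c _
    cases ws with
    | nil =>
      simp only [bOffs, List.length_cons, List.length_nil, List.getD_cons_succ, List.getD_cons_zero,
        PySem.Str.len_eq, PySem.Str.toList_join, List.map_cons, List.map_nil,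
        PySem.Chars.join_singleton]
    | cons w2 ws2 =>
      have hih := ih (c + PySem.Str.len w + 1) (by simp)
      simp only [List.length_cons] at hih ⊢
      rw [show bOffs (w :: w2 :: ws2) c = c :: bOffs (w2 :: ws2) (c + PySem.Str.len w + 1) from rfl,
          List.getD_cons_succ, hih]
      simp only [PySem.Str.len_eq, PySem.Str.toList_join, List.map_cons,
        PySem.Chars.join_cons_cons, List.length_append]
      push_cast [List.length_singleton]
      omega

-- ===== VERDICT (by name: the statement is the Claim_ definition above) =====
theorem compute_span_offsets_py_spec : Claim_equal_compute_span_offsets_py := by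
  unfold Claim_equal_compute_span_offsets_py Spec_compute_span_offsets_py
  intro words tis _
  unfold compute_span_offsets_py compute_span_offsets_py_alt
  by_cases hg : tis = [] ∨ words = []
  · rw [if_pos hg, if_pos hg]
  · rw [if_neg hg, if_neg hg]
    rw [not_or] at hg
    obtain ⟨ht, hw⟩ := hg
    obtain ⟨m, hm⟩ : ∃ m, PySem.List.min? tis (fun x => x) = some m := by
      cases h : PySem.List.min? tis (fun x => x) with
      | none => exact absurd ((PySem.List.min?_eq_none_iff _ _).1 h) ht
      | some m => exact ⟨m, rfl⟩
    obtain ⟨M, hM⟩ : ∃ M, PySem.List.max? tis (fun x => x) = some M := by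
      cases h : PySem.List.max? tis (fun x => x) with
      | none => exact absurd ((PySem.List.max?_eq_none_iff _ _).1 h) ht
      | some M => exact ⟨M, rfl⟩
    have hmM : m ≤ M := PySem.List.min?_isMin hm M (PySem.List.max?_mem hM)
    simp only [hm, hM, Option.getD_some]
    rw [aLoop_eq m M hmM words 0 0 none]
    simp only [zero_add, sub_zero, Prod.mk.injEq]
    constructor
    · by_cases h1 : 0 ≤ m ∧ m < (words.length : Int)
      · rw [if_pos h1, if_pos h1, Option.getD_some]
      · rw [if_neg h1, if_neg h1, Option.getD_none]
    · by_cases h2 : 0 ≤ M ∧ M < (words.length : Int)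
      · rw [if_pos h2, if_pos h2, Option.getD_some]
      · rw [if_neg h2, if_neg h2, Option.getD_none,
            bOffs_getD_full words 0 hw, Option.some.injEq]
        omega
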